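-- pv_equiv track=rewrite | github.com/ifpb/ped-redes-2023.1 | ED/3-Recursividade/exercicios.py | comparar_listas_iguais
-- ===== SOURCE A (Python) =====
-- def comparar_listas_iguais(lista1, lista2):
--     # Se ambas as listas estiverem vazias, elas são iguais
--     if not lista1 and not lista2:
--         return True
--
--     # Se apenas uma das listas estiver vazia, elas não são iguais
--     if not lista1 or not lista2:
--         return False
--
--     # Se os primeiros elementos das listas forem diferentes, elas não são iguais
--     if lista1[0] != lista2[0]:
--         return False
--
--     # Recursivamente compara as sublistas restantes
--     return comparar_listas_iguais(lista1[1:], lista2[1:])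
-- ===== SOURCE B (Python) =====
-- def comparar_listas_iguais(lista1, lista2):
--     if len(lista1) != len(lista2):
--         return False
--     for x, y in zip(lista1, lista2):
--         if x != y:
--             return False
--     return True
-- ===== Notes on version B (the rewrite author's own statement) =====
-- stated objective: simpler
-- what changed: Replaced the tail recursion with repeated list slicing by a single length check followed by one forward pass over zip(lista1, lista2).
import Mathlib
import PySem

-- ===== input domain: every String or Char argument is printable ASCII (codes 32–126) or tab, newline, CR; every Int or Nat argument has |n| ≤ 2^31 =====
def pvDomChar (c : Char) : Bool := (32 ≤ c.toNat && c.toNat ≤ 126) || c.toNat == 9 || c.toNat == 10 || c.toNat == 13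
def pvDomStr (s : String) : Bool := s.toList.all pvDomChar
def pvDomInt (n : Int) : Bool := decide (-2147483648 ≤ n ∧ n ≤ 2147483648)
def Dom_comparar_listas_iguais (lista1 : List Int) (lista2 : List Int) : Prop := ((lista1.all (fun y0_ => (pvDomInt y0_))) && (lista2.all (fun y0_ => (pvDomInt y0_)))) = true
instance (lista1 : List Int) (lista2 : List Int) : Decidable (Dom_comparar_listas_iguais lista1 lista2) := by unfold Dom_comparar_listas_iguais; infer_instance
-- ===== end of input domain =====

-- B replaces A's tail recursion with slicing by a length check plus one pass over the zipped lists (simpler).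

-- ===== PORT A =====
def comparar_listas_iguais (lista1 : List Int) (lista2 : List Int) : Bool :=
  -- if not lista1 and not lista2: return True
  if lista1 = [] ∧ lista2 = [] then true
  -- if not lista1 or not lista2: return False
  else if lista1 = [] ∨ lista2 = [] then false
  -- if lista1[0] != lista2[0]: return False
  else
    match lista1, lista2 with
    | a :: t1, b :: t2 => if a ≠ b then false else comparar_listas_iguais t1 t2
    | _, _ => false  -- unreachable: both lists nonempty here

-- ===== PORT B =====
def comparar_listas_iguais_alt (lista1 : List Int) (lista2 : List Int) : Bool :=
  if lista1.length ≠ lista2.length then false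
  else (lista1.zip lista2).all (fun p => !(p.1 ≠ p.2))

-- ===== PRECONDITION & SPEC =====
def Spec_comparar_listas_iguais (lista1 : List Int) (lista2 : List Int) (out : Bool) : Prop := out = comparar_listas_iguais_alt lista1 lista2
instance (lista1 : List Int) (lista2 : List Int) (out : Bool) : Decidable (Spec_comparar_listas_iguais lista1 lista2 out) := by unfold Spec_comparar_listas_iguais; infer_instance

-- ===== CLAIM (what is proved, stated in full; the proofs are below) =====
def Claim_equal_comparar_listas_iguais : Prop := ∀ (lista1 : List Int) (lista2 : List Int), Dom_comparar_listas_iguais lista1 lista2 → Spec_comparar_listas_iguais lista1 lista2 (comparar_listas_iguais lista1 lista2)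

-- ===== LEMMAS AND PROOFS =====
theorem ports_agree : ∀ (l1 l2 : List Int), comparar_listas_iguais l1 l2 = comparar_listas_iguais_alt l1 l2 := by
  intro l1
  induction l1 with
  | nil =>
    intro l2
    cases l2 <;> simp [comparar_listas_iguais, comparar_listas_iguais_alt]
  | cons a t1 ih =>
    intro l2
    cases l2 with
    | nil => simp [comparar_listas_iguais, comparar_listas_iguais_alt]
    | cons b t2 =>
      simp only [comparar_listas_iguais, comparar_listas_iguais_alt]
      by_cases hab : a = b
      · subst hab
        simp only [List.length_cons, List.zip_cons_cons, List.all_cons]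
        rw [ih t2]
        simp [comparar_listas_iguais_alt]
      · simp [hab]

-- ===== VERDICT (by name: the statement is the Claim_ definition above) =====
theorem comparar_listas_iguais_spec : Claim_equal_comparar_listas_iguais := by
  intro l1 l2 _
  unfold Spec_comparar_listas_iguais
  exact ports_agree l1 l2
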